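-- pv_equiv track=rewrite | github.com/schma-design/gold_paper_functions | comp_gold_funcs.py | get_scan_pair_times
-- ===== SOURCE A (Python) =====
-- from collections import defaultdict
--
-- def get_scan_pair_times(valid_points, nscans):
--     """
--     Compute earliest (start) and latest (end) valid times for each scan pair.
--     valid_points: output list from extract_valid_[var]_points()
--     nscans: total number of scans in data
--     """
--     start_times = []
--     end_times = []
--
--     # Group by scan index i
--     scan_groups = defaultdict(list)
--     for p in valid_points:
--         scan_groups[p["i"]].append(p["time"])
--
--     for i in range(0, nscans, 2):
--         if scan_groups[i]:
--             start_time = min(scan_groups[i])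
--         else:
--             start_time = None
--
--         if (i + 1) in scan_groups and scan_groups[i + 1]:
--             end_time = max(scan_groups[i + 1])
--         else:
--             end_time = None
--
--         start_times.append(start_time)
--         end_times.append(end_time)
--
--     return start_times, end_times
-- ===== SOURCE B (Python) =====
-- def get_scan_pair_times(valid_points, nscans):
--     """
--     Compute earliest (start) and latest (end) valid times for each scan pair.
--     One pass over valid_points keeping only a running min (even scans) /
--     running max (odd scans) per scan index; no intermediate time lists.
--     """
--     min_time = {}
--     max_time = {}
--     for p in valid_points:
--         i = p["i"]
--         t = p["time"]
--         if i % 2 == 0: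
--             if i not in min_time or t < min_time[i]:
--                 min_time[i] = t
--         else:
--             if i not in max_time or t > max_time[i]:
--                 max_time[i] = t
--
--     start_times = []
--     end_times = []
--     for i in range(0, nscans, 2):
--         start_times.append(min_time.get(i))
--         end_times.append(max_time.get(i + 1))
--     return start_times, end_times
-- ===== Notes on version B (the rewrite author's own statement) =====
-- stated objective: alternative
-- what changed: Instead of grouping all times into per-scan lists and then taking min()/max() per group, B keeps one running minimum (even scans) and one running maximum (odd scans) per index in a single pass, eliminating the intermediate lists; the output loop just looks the extremes up with dict.get.
import Mathlib
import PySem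

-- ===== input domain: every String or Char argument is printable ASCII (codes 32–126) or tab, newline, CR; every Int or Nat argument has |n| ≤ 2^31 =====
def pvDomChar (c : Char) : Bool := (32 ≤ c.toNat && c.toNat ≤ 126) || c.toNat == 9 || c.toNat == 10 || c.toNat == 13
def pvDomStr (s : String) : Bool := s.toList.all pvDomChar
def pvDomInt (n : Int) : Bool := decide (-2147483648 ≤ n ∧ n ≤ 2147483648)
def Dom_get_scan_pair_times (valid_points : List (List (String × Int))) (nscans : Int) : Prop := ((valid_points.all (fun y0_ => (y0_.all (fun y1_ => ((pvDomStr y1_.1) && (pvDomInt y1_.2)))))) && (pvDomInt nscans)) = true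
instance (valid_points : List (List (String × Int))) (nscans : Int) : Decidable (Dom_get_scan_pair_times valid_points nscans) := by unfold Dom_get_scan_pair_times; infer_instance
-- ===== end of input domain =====

-- B replaces A's per-scan time lists (grouped first, min/max taken afterwards) by a single
-- pass keeping a running min per even index and a running max per odd index.

-- ===== PORT A =====
-- shared helper: p["i"], p["time"] (none = KeyError, excluded by Pre_)
def pvKeyTime (p : List (String × Int)) : Option (Int × Int) :=
  match (PySem.Dict.mk p).get? "i", (PySem.Dict.mk p).get? "time" with
  | some i, some t => some (i, t)
  | _, _ => none

def get_scan_pair_times (valid_points : List (List (String × Int))) (nscans : Int) : List (Option Int) × List (Option Int) :=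
  -- scan_groups = defaultdict(list); for p: scan_groups[p["i"]].append(p["time"])
  let scan_groups : PySem.Dict Int (List Int) :=
    valid_points.foldl (fun g p =>
      match pvKeyTime p with
      | some q => g.modify q.1 [] (· ++ [q.2])
      | none => g) PySem.Dict.empty
  -- for i in range(0, nscans, 2): …  (reading scan_groups[i] on a defaultdict inserts [] when absent)
  let r := (PySem.List.pyRange 0 nscans 2).foldl
    (fun (s : PySem.Dict Int (List Int) × List (Option Int) × List (Option Int)) i =>
      let g := s.1
      let gi := g.getD i []
      let g1 := if g.contains i then g else g.insert i []
      let start_time : Option Int := if gi.isEmpty then none else PySem.List.min? gi (fun x => x)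
      let end_time : Option Int :=
        if g1.contains (i + 1) && !((g1.getD (i + 1) []).isEmpty) then
          PySem.List.max? (g1.getD (i + 1) []) (fun x => x)
        else none
      (g1, s.2.1 ++ [start_time], s.2.2 ++ [end_time]))
    (scan_groups, ([], []))
  (r.2.1, r.2.2)

-- ===== PORT B =====
def get_scan_pair_times_alt (valid_points : List (List (String × Int))) (nscans : Int) : List (Option Int) × List (Option Int) :=
  let s : PySem.Dict Int Int × PySem.Dict Int Int :=
    valid_points.foldl (fun s p =>
      match pvKeyTime p with
      | some (i, t) =>
        if PySem.Int.mod i 2 == 0 then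
          (if s.1.contains i then (if t < s.1.getD i 0 then s.1.insert i t else s.1) else s.1.insert i t, s.2)
        else
          (s.1, if s.2.contains i then (if t > s.2.getD i 0 then s.2.insert i t else s.2) else s.2.insert i t)
      | none => s) (PySem.Dict.empty, PySem.Dict.empty)
  (PySem.List.pyRange 0 nscans 2).foldl
    (fun (r : List (Option Int) × List (Option Int)) i =>
      (r.1 ++ [s.1.get? i], r.2 ++ [s.2.get? (i + 1)]))
    ([], [])

-- ===== PRECONDITION & SPEC =====
-- A raises KeyError when a point lacks key "i" or "time"; Pre_ requires both keys present.
def Pre_get_scan_pair_times (valid_points : List (List (String × Int))) (nscans : Int) : Prop :=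
  ∀ p ∈ valid_points, ((PySem.Dict.mk p).get? "i").isSome = true ∧ ((PySem.Dict.mk p).get? "time").isSome = true

instance (valid_points : List (List (String × Int))) (nscans : Int) : Decidable (Pre_get_scan_pair_times valid_points nscans) := by unfold Pre_get_scan_pair_times; infer_instance

def pvWitness_get_scan_pair_times : (List (List (String × Int))) × Int :=
  ([[("i", 0), ("time", 5)], [("i", 0), ("time", 2)], [("i", 1), ("time", 7)]], 2)

def Spec_get_scan_pair_times (valid_points : List (List (String × Int))) (nscans : Int) (out : List (Option Int) × List (Option Int)) : Prop := out = get_scan_pair_times_alt valid_points nscans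
instance (valid_points : List (List (String × Int))) (nscans : Int) (out : List (Option Int) × List (Option Int)) : Decidable (Spec_get_scan_pair_times valid_points nscans out) := by unfold Spec_get_scan_pair_times; infer_instance

-- ===== CLAIM (what is proved, stated in full; the proofs are below) =====
def Claim_equal_get_scan_pair_times : Prop := ∀ (valid_points : List (List (String × Int))) (nscans : Int), Dom_get_scan_pair_times valid_points nscans → Pre_get_scan_pair_times valid_points nscans → Spec_get_scan_pair_times valid_points nscans (get_scan_pair_times valid_points nscans)

-- ===== LEMMAS AND PROOFS =====

-- times of the points with scan index j, in input order
def pvTimes (valid_points : List (List (String × Int))) (j : Int) : List Int :=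
  ((valid_points.filterMap pvKeyTime).filter (fun q => q.1 == j)).map (·.2)

-- the value A appends for an even index i (start) and for i+1 (end)
def pvStartV (valid_points : List (List (String × Int))) (i : Int) : Option Int :=
  if (pvTimes valid_points i).isEmpty then none else PySem.List.min? (pvTimes valid_points i) (fun x => x)
def pvEndV (valid_points : List (List (String × Int))) (i : Int) : Option Int :=
  if (pvTimes valid_points (i + 1)).isEmpty then none else PySem.List.max? (pvTimes valid_points (i + 1)) (fun x => x)

-- running min/max over a list starting from an optional current extreme (B's update rule)
def pvOptMin : Option Int → List Int → Option Int
  | o, [] => o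
  | none, t :: ts => pvOptMin (some t) ts
  | some c, t :: ts => pvOptMin (some (if t < c then t else c)) ts
def pvOptMax : Option Int → List Int → Option Int
  | o, [] => o
  | none, t :: ts => pvOptMax (some t) ts
  | some c, t :: ts => pvOptMax (some (if t > c then t else c)) ts

theorem pvOptMin_some (c : Int) (l : List Int) :
    pvOptMin (some c) l = some (l.foldl (fun c t => if t < c then t else c) c) := by
  induction l generalizing c with
  | nil => rfl
  | cons t ts ih => simp [pvOptMin, List.foldl, ih]

theorem pvOptMax_some (c : Int) (l : List Int) :
    pvOptMax (some c) l = some (l.foldl (fun c t => if t > c then t else c) c) := by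
  induction l generalizing c with
  | nil => rfl
  | cons t ts ih => simp [pvOptMax, List.foldl, ih]

theorem pvOptMin_none (l : List Int) :
    pvOptMin none l = if l.isEmpty then none else PySem.List.min? l (fun x => x) := by
  cases l with
  | nil => rfl
  | cons x t =>
    rw [PySem.List.min?_id_cons]
    show pvOptMin (some x) t = _
    rw [pvOptMin_some]
    have : t.foldl (fun c t => if t < c then t else c) x = t.foldl min x := by
      apply PySem.List.foldl_congr_mem
      intro c y _
      simp only [min_def]
      split_ifs <;> omega
    simp [this]

theorem pvOptMax_none (l : List Int) :
    pvOptMax none l = if l.isEmpty then none else PySem.List.max? l (fun x => x) := by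
  cases l with
  | nil => rfl
  | cons x t =>
    rw [PySem.List.max?_id_cons]
    show pvOptMax (some x) t = _
    rw [pvOptMax_some]
    have : t.foldl (fun c t => if t > c then t else c) x = t.foldl max x := by
      apply PySem.List.foldl_congr_mem
      intro c y _
      simp only [max_def]
      split_ifs <;> omega
    simp [this]

-- A's grouping loop is the modify-append fold over the extracted (index, time) pairs
theorem pvGroups_eq (valid_points : List (List (String × Int))) (g : PySem.Dict Int (List Int)) :
    valid_points.foldl (fun g p =>
      match pvKeyTime p with
      | some q => g.modify q.1 [] (· ++ [q.2])
      | none => g) g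
    = (valid_points.filterMap pvKeyTime).foldl (fun d q => d.modify q.1 [] (· ++ [q.2])) g := by
  induction valid_points generalizing g with
  | nil => rfl
  | cons p rest ih =>
    cases h : pvKeyTime p <;> simp [h, List.foldl, ih]

theorem pvGroups_getD (valid_points : List (List (String × Int))) (j : Int) :
    (valid_points.foldl (fun g p =>
      match pvKeyTime p with
      | some q => g.modify q.1 [] (· ++ [q.2])
      | none => g) PySem.Dict.empty).getD j [] = pvTimes valid_points j := by
  rw [pvGroups_eq, PySem.Dict.getD_foldl_modify_append]
  simp [pvTimes, PySem.Dict.getD_empty]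

-- the end-time test depends only on getD (an absent key reads as [])
theorem pvEndTest (g : PySem.Dict Int (List Int)) (j : Int) :
    (if g.contains j && !((g.getD j []).isEmpty) then PySem.List.max? (g.getD j []) (fun x => x) else none)
    = (if (g.getD j []).isEmpty then none else PySem.List.max? (g.getD j []) (fun x => x)) := by
  cases h : g.contains j with
  | false => simp [PySem.Dict.getD_of_not_contains g [] h]
  | true => cases he : (g.getD j []).isEmpty <;> simp [he]

-- A's output loop, for any groups dict whose reads agree with pvTimes
theorem pvLoopA (valid_points : List (List (String × Int))) (is : List Int)
    (g : PySem.Dict Int (List Int)) (st en : List (Option Int))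
    (hg : ∀ j, g.getD j [] = pvTimes valid_points j) :
    (is.foldl (fun (s : PySem.Dict Int (List Int) × List (Option Int) × List (Option Int)) i =>
      let g := s.1
      let gi := g.getD i []
      let g1 := if g.contains i then g else g.insert i []
      let start_time : Option Int := if gi.isEmpty then none else PySem.List.min? gi (fun x => x)
      let end_time : Option Int :=
        if g1.contains (i + 1) && !((g1.getD (i + 1) []).isEmpty) then
          PySem.List.max? (g1.getD (i + 1) []) (fun x => x)
        else none
      (g1, s.2.1 ++ [start_time], s.2.2 ++ [end_time])) (g, (st, en))).2
    = (st ++ is.map (pvStartV valid_points), en ++ is.map (pvEndV valid_points)) := by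
  induction is generalizing g st en with
  | nil => simp
  | cons i rest ih =>
    simp only [List.foldl, List.map]
    have hg1 : ∀ j, (if g.contains i then g else g.insert i []).getD j [] = pvTimes valid_points j := by
      intro j
      cases h : g.contains i with
      | true => simp [hg j]
      | false =>
        rw [if_neg (by simp [h]), PySem.Dict.getD_insert]
        split_ifs with hj
        · rw [hj, ← hg i, PySem.Dict.getD_of_not_contains g [] h]
        · exact hg j
    rw [ih _ _ _ hg1]
    have hst : (if (g.getD i []).isEmpty then none else PySem.List.min? (g.getD i []) (fun x => x))
        = pvStartV valid_points i := by rw [hg i]; rfl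
    have hen : (if (if g.contains i then g else g.insert i []).contains (i + 1) &&
          !(((if g.contains i then g else g.insert i []).getD (i + 1) []).isEmpty) then
          PySem.List.max? ((if g.contains i then g else g.insert i []).getD (i + 1) []) (fun x => x)
        else none) = pvEndV valid_points i := by
      rw [pvEndTest, hg1 (i + 1)]; rfl
    rw [hst, hen]
    simp

-- B's one-pass extremes: get? of the min dict at an even key (max dict at an odd key)
-- is the running extreme over that key's times
theorem pvBuildB (valid_points : List (List (String × Int)))
    (mn mx : PySem.Dict Int Int) (j : Int) :
    (PySem.Int.mod j 2 = 0 →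
      (valid_points.foldl (fun (s : PySem.Dict Int Int × PySem.Dict Int Int) p =>
        match pvKeyTime p with
        | some (i, t) =>
          if PySem.Int.mod i 2 == 0 then
            (if s.1.contains i then (if t < s.1.getD i 0 then s.1.insert i t else s.1) else s.1.insert i t, s.2)
          else
            (s.1, if s.2.contains i then (if t > s.2.getD i 0 then s.2.insert i t else s.2) else s.2.insert i t)
        | none => s) (mn, mx)).1.get? j = pvOptMin (mn.get? j) (pvTimes valid_points j))
    ∧ (PySem.Int.mod j 2 ≠ 0 →
      (valid_points.foldl (fun (s : PySem.Dict Int Int × PySem.Dict Int Int) p =>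
        match pvKeyTime p with
        | some (i, t) =>
          if PySem.Int.mod i 2 == 0 then
            (if s.1.contains i then (if t < s.1.getD i 0 then s.1.insert i t else s.1) else s.1.insert i t, s.2)
          else
            (s.1, if s.2.contains i then (if t > s.2.getD i 0 then s.2.insert i t else s.2) else s.2.insert i t)
        | none => s) (mn, mx)).2.get? j = pvOptMax (mx.get? j) (pvTimes valid_points j)) := by
  induction valid_points generalizing mn mx with
  | nil => simp [pvTimes, pvOptMin, pvOptMax]
  | cons p rest ih =>
    cases hp : pvKeyTime p with
    | none =>
      have ht : ∀ j', pvTimes (p :: rest) j' = pvTimes rest j' := by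
        intro j'; simp [pvTimes, hp]
      simp only [List.foldl, hp, ht]
      exact ih mn mx
    | some q =>
      obtain ⟨i, t⟩ := q
      have ht : ∀ j', pvTimes (p :: rest) j' =
          (if i = j' then t :: pvTimes rest j' else pvTimes rest j') := by
        intro j'
        simp only [pvTimes, List.filterMap_cons, hp, List.filter_cons]
        split_ifs with h <;> simp_all
      by_cases hi : PySem.Int.mod i 2 = 0
      · -- even index: the min dict is updated
        simp only [List.foldl, hp]
        rw [if_pos (by rw [hi]; rfl)]
        constructor
        · intro hj
          rw [(ih _ mx).1 hj, ht j]
          by_cases hij : i = j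
          · subst hij
            cases hc : mn.contains i with
            | false =>
              have hn : mn.get? i = none := by
                have := PySem.Dict.contains_eq_isSome_get? mn i
                rw [hc] at this
                cases h : mn.get? i with
                | none => rfl
                | some v => rw [h] at this; simp at this
              simp [hc, hn, PySem.Dict.get?_insert_self, pvOptMin]
            | true =>
              obtain ⟨c, hcv⟩ : ∃ c, mn.get? i = some c := by
                have := PySem.Dict.contains_eq_isSome_get? mn i
                rw [hc] at this
                cases h : mn.get? i with
                | none => rw [h] at this; simp at this
                | some v => exact ⟨v, rfl⟩
              have hd : mn.getD i 0 = c := by rw [PySem.Dict.getD_eq_get?_getD, hcv]; rfl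
              simp only [hc, if_true, hd]
              by_cases hlt : t < c
              · simp [hlt, PySem.Dict.get?_insert_self, hcv, pvOptMin]
              · simp [hlt, hcv, pvOptMin]
          · rw [if_neg hij]
            congr 1
            cases hc : mn.contains i <;>
              simp [hc, PySem.Dict.get?_insert_of_ne _ _ (Ne.symm hij)] <;>
              split_ifs <;> simp [PySem.Dict.get?_insert_of_ne _ _ (Ne.symm hij)]
        · intro hj
          rw [(ih _ mx).2 hj, ht j]
          have hij : i ≠ j := by intro h; subst h; exact hj hi
          rw [if_neg hij]
      · -- odd index: the max dict is updated
        have hi' : (PySem.Int.mod i 2 == 0) = false := by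
          cases h : (PySem.Int.mod i 2 == 0) with
          | false => rfl
          | true => exact absurd (by simpa using h) hi
        simp only [List.foldl, hp, hi', Bool.false_eq_true, if_false]
        constructor
        · intro hj
          rw [(ih mn _).1 hj, ht j]
          have hij : i ≠ j := by intro h; subst h; exact hi hj
          rw [if_neg hij]
        · intro hj
          rw [(ih mn _).2 hj, ht j]
          by_cases hij : i = j
          · subst hij
            cases hc : mx.contains i with
            | false =>
              have hn : mx.get? i = none := by
                have := PySem.Dict.contains_eq_isSome_get? mx i
                rw [hc] at this
                cases h : mx.get? i with
                | none => rfl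
                | some v => rw [h] at this; simp at this
              simp [hc, hn, PySem.Dict.get?_insert_self, pvOptMax]
            | true =>
              obtain ⟨c, hcv⟩ : ∃ c, mx.get? i = some c := by
                have := PySem.Dict.contains_eq_isSome_get? mx i
                rw [hc] at this
                cases h : mx.get? i with
                | none => rw [h] at this; simp at this
                | some v => exact ⟨v, rfl⟩
              have hd : mx.getD i 0 = c := by rw [PySem.Dict.getD_eq_get?_getD, hcv]; rfl
              simp only [hc, if_true, hd]
              by_cases hgt : t > c
              · simp [hgt, PySem.Dict.get?_insert_self, hcv, pvOptMax]
              · simp [hgt, hcv, pvOptMax]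
          · rw [if_neg hij]
            congr 1
            cases hc : mx.contains i <;>
              simp [hc, PySem.Dict.get?_insert_of_ne _ _ (Ne.symm hij)] <;>
              split_ifs <;> simp [PySem.Dict.get?_insert_of_ne _ _ (Ne.symm hij)]

theorem get_scan_pair_times_spec : Claim_equal_get_scan_pair_times := by
  intro valid_points nscans _ _
  unfold Spec_get_scan_pair_times get_scan_pair_times get_scan_pair_times_alt
  simp only []
  -- A's side: the output pair is the two mapped lists
  rw [pvLoopA valid_points _ _ [] [] (fun j => pvGroups_getD valid_points j)]
  -- B's side: split the pair fold, turn the appends into maps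
  rw [PySem.List.foldl_prod_mk
    (f := fun (r : List (Option Int)) (i : Int) =>
      r ++ [(valid_points.foldl (fun (s : PySem.Dict Int Int × PySem.Dict Int Int) p =>
        match pvKeyTime p with
        | some (i, t) =>
          if PySem.Int.mod i 2 == 0 then
            (if s.1.contains i then (if t < s.1.getD i 0 then s.1.insert i t else s.1) else s.1.insert i t, s.2)
          else
            (s.1, if s.2.contains i then (if t > s.2.getD i 0 then s.2.insert i t else s.2) else s.2.insert i t)
        | none => s) (PySem.Dict.empty, PySem.Dict.empty)).1.get? i])
    (g := fun (r : List (Option Int)) (i : Int) =>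
      r ++ [(valid_points.foldl (fun (s : PySem.Dict Int Int × PySem.Dict Int Int) p =>
        match pvKeyTime p with
        | some (i, t) =>
          if PySem.Int.mod i 2 == 0 then
            (if s.1.contains i then (if t < s.1.getD i 0 then s.1.insert i t else s.1) else s.1.insert i t, s.2)
          else
            (s.1, if s.2.contains i then (if t > s.2.getD i 0 then s.2.insert i t else s.2) else s.2.insert i t)
        | none => s) (PySem.Dict.empty, PySem.Dict.empty)).2.get? (i + 1)])]
  rw [PySem.List.foldl_append_singleton_eq_map, PySem.List.foldl_append_singleton_eq_map]
  simp only [List.nil_append, Prod.mk.injEq]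
  constructor
  · apply List.map_congr_left
    intro i hi
    have hdvd : (2 : Int) ∣ i := by
      have := (PySem.List.mem_pyRange_iff_of_pos (a := 0) (b := nscans) (by norm_num) i).1 hi
      simpa using this.2.2
    have hmod : PySem.Int.mod i 2 = 0 := (PySem.Int.mod_eq_zero_iff_dvd i 2).2 hdvd
    rw [(pvBuildB valid_points PySem.Dict.empty PySem.Dict.empty i).1 hmod,
        PySem.Dict.get?_empty, pvOptMin_none]
    rfl
  · apply List.map_congr_left
    intro i hi
    have hdvd : (2 : Int) ∣ i := by
      have := (PySem.List.mem_pyRange_iff_of_pos (a := 0) (b := nscans) (by norm_num) i).1 hi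
      simpa using this.2.2
    have hmod : PySem.Int.mod (i + 1) 2 ≠ 0 := by
      intro h
      have h2 : (2 : Int) ∣ i + 1 := (PySem.Int.mod_eq_zero_iff_dvd (i + 1) 2).1 h
      omega
    rw [(pvBuildB valid_points PySem.Dict.empty PySem.Dict.empty (i + 1)).2 hmod,
        PySem.Dict.get?_empty, pvOptMax_none]
    rfl
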